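-- pv_equiv track=rewrite | github.com/YeowonKIM/Algorithms | 프로그래머스/4/42891. 무지의 먹방 라이브/무지의 먹방 라이브.py | solution
-- ===== SOURCE A (Python) =====
-- import heapq
--
-- def solution(food_times, k):
--     if sum(food_times) <= k:
--         return -1
--
--     N = len(food_times)
--     prev = 0
--
--     q = []
--     for index, time in enumerate(food_times):
--         heapq.heappush(q, (time, index+1))
--
--     while k - (q[0][0] - prev) * N >= 0:
--         time, curr = heapq.heappop(q)
--         k -= (time - prev) * N
--         prev = time
--         N -= 1
--
--     q.sort(key=lambda x:x[1])
--     return q[k % N][1]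
-- ===== SOURCE B (Python) =====
-- def solution(food_times, k):
--     # Parametric binary search: find the largest threshold T with
--     # cost(T) = sum(min(f, T)) <= k; survivors are foods with f > T and the
--     # answer is the (k - cost(T))-th of them in original index order.
--     if sum(food_times) <= k:
--         return -1
--     n = len(food_times)
--
--     def cost(t):
--         return sum(min(f, t) for f in food_times)
--
--     lo = min(min(food_times), k // n)   # cost(lo) = lo*n <= k
--     hi = max(food_times)                # cost(hi) = sum > k
--     while hi - lo > 1:
--         mid = (lo + hi) // 2
--         if cost(mid) <= k:
--             lo = mid
--         else:
--             hi = mid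
--     r = k - cost(lo)                    # 0 <= r < number of survivors
--     for i, f in enumerate(food_times):
--         if f > lo:
--             if r == 0:
--                 return i + 1
--             r -= 1
-- ===== Notes on version B (the rewrite author's own statement) =====
-- stated objective: alternative
-- what changed: Replaces the heap-driven round-by-round simulation by a parametric binary search for the largest threshold T with sum(min(f,T)) <= k, then a single index-order scan that returns the (k-cost(T))-th food with f > T; no priority queue and no sorting at all.
-- outside the precondition, e.g. on solution([], -1): A raises IndexError, B raises ValueError
import Mathlib
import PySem

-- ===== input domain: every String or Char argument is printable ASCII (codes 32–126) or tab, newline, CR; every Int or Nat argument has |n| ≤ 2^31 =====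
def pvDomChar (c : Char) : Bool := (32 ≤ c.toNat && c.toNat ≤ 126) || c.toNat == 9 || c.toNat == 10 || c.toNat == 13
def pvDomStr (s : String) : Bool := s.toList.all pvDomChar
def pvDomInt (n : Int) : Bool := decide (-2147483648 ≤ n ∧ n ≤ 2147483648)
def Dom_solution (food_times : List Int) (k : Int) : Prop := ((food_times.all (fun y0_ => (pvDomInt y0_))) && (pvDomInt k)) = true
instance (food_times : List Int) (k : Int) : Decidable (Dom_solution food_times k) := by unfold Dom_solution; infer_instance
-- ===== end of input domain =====

-- B replaces A's heap simulation by a parametric binary search for the largest threshold T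
-- with sum(min(f,T)) ≤ k, then one index-order scan for the survivor (objective: alternative).

-- ===== PORT A =====
-- heapq.heappush/heappop on tuples is modelled as a sorted-list priority queue ordered by
-- Python's lexicographic tuple '<'; this is exact for the returned value: pops happen in
-- ascending (time, index) order, and the final q.sort(key=x[1]) over distinct indices
-- depends only on the heap's contents as a multiset, not on the heap-array layout.
def heapPush (x : Int × Int) : List (Int × Int) → List (Int × Int)
  | [] => [x]
  | y :: ys =>
      if x.1 < y.1 ∨ (x.1 = y.1 ∧ x.2 < y.2) then x :: y :: ys else y :: heapPush x ys

-- the while loop: pop the minimum while the whole round is affordable; on an empty heap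
-- Python raises IndexError at q[0] (excluded by Pre_), here we just return the state.
def eatLoop : List (Int × Int) → Int → Int → Int → (List (Int × Int) × Int × Int)
  | [], k, _, n => ([], k, n)
  | (t, c) :: rest, k, prev, n =>
      if 0 ≤ k - (t - prev) * n then eatLoop rest (k - (t - prev) * n) t (n - 1)
      else ((t, c) :: rest, k, n)

def solution (food_times : List Int) (k : Int) : Int :=
  if food_times.sum ≤ k then -1
  else
    let q := (PySem.List.enumerate food_times).foldl
      (fun acc p => heapPush (p.2, p.1 + 1) acc) []
    let r := eatLoop q k 0 (food_times.length : Int)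
    let qs := PySem.List.sorted r.1 (fun x => x.2)
    -- q[k % N][1]; PySem.Int.mod is Python's '%'.  The .getD default is reached only on
    -- the empty input with k < 0, where Python raises (excluded by Pre_).
    ((PySem.List.pyGet? qs (PySem.Int.mod r.2.1 r.2.2)).getD (0, 0)).2

-- ===== PORT B =====
-- cost(t) = sum(min(f, t) for f in food_times)
def costB (food_times : List Int) (t : Int) : Int :=
  (food_times.map (fun f => min f t)).sum

-- the 'while hi - lo > 1' binary search of Source B; the Nat fuel (= the initial interval
-- width) only makes the recursion structural: the width shrinks by at least 1 per
-- iteration, so the fuel is never exhausted.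
def bsearchGo (food_times : List Int) (k : Int) : Nat → Int → Int → Int
  | 0, lo, _ => lo
  | fuel + 1, lo, hi =>
      if 1 < hi - lo then
        let mid := PySem.Int.floordiv (lo + hi) 2
        if costB food_times mid ≤ k then bsearchGo food_times k fuel mid hi
        else bsearchGo food_times k fuel lo mid
      else lo

def bsearch (food_times : List Int) (k : Int) (lo hi : Int) : Int :=
  bsearchGo food_times k (hi - lo).toNat lo hi

-- the final 'for i, f in enumerate(food_times)' scan returning i+1 at the r-th survivor.
-- The [] fallthrough (Python's implicit None) is unreachable whenever sum > k, since then
-- 0 ≤ r < number of survivors.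
def pick (T : Int) : List (Int × Int) → Int → Int
  | [], _ => 0
  | (i, f) :: rest, r =>
      if T < f then (if r = 0 then i + 1 else pick T rest (r - 1))
      else pick T rest r

def solution_alt (food_times : List Int) (k : Int) : Int :=
  if food_times.sum ≤ k then -1
  else
    let n : Int := food_times.length
    -- min(food_times) / max(food_times): the .getD 0 default is reached only on the empty
    -- input with k < 0, where Python raises ValueError (excluded by Pre_).
    let lo0 := min ((PySem.List.min? food_times (fun x => x)).getD 0)
      (PySem.Int.floordiv k n)
    let hi0 := (PySem.List.max? food_times (fun x => x)).getD 0
    let T := bsearch food_times k lo0 hi0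
    let r := k - costB food_times T
    pick T (PySem.List.enumerate food_times) r

-- ===== PRECONDITION & SPEC =====
-- Pre_ excludes only the inputs where Python A raises: on food_times = [] with k < 0 the
-- guard sum <= k fails and A hits q[0] on an empty heap (IndexError); B raises there too.
def Pre_solution (food_times : List Int) (k : Int) : Prop := food_times = [] → 0 ≤ k
instance (food_times : List Int) (k : Int) : Decidable (Pre_solution food_times k) := by
  unfold Pre_solution; infer_instance

def pvWitness_solution : List Int × Int := ([3, 1, 2], 5)

def Spec_solution (food_times : List Int) (k : Int) (out : Int) : Prop :=
  out = solution_alt food_times k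
instance (food_times : List Int) (k : Int) (out : Int) :
    Decidable (Spec_solution food_times k out) := by unfold Spec_solution; infer_instance

-- ===== CLAIM (what is proved, stated in full; the proofs are below) =====
def Claim_equal_solution : Prop := ∀ (food_times : List Int) (k : Int),
  Dom_solution food_times k → Pre_solution food_times k →
  Spec_solution food_times k (solution food_times k)

-- ===== LEMMAS AND PROOFS =====

-- cost is monotone
theorem costB_mono (fs : List Int) {a b : Int} (h : a ≤ b) : costB fs a ≤ costB fs b := by
  induction fs with
  | nil => simp [costB]
  | cons f fs ih => simp only [costB, List.map_cons, List.sum_cons] at ih ⊢; omega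

-- cost(t+1) = cost(t) + #survivors(t)
theorem costB_succ (fs : List Int) (t : Int) :
    costB fs (t + 1) = costB fs t + ((fs.filter (fun f => decide (t < f))).length : Int) := by
  induction fs with
  | nil => simp [costB]
  | cons f fs ih =>
      by_cases h : t < f <;>
        simp only [costB, List.map_cons, List.sum_cons, List.filter_cons, h,
          decide_true, decide_false, if_true, List.length_cons] at ih ⊢ <;>
        push_cast <;> omega

theorem costB_of_le (fs : List Int) (t : Int) (h : ∀ f ∈ fs, t ≤ f) :
    costB fs t = t * fs.length := by
  induction fs with
  | nil => simp [costB]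
  | cons f fs ih =>
      have h1 := h f (by simp)
      have h2 := ih (fun g hg => h g (by simp [hg]))
      simp only [costB, List.map_cons, List.sum_cons, List.length_cons] at h2 ⊢
      push_cast
      have : t * ((fs.length : Int) + 1) = t * fs.length + t := by ring
      omega

theorem costB_of_ge (fs : List Int) (t : Int) (h : ∀ f ∈ fs, f ≤ t) :
    costB fs t = fs.sum := by
  induction fs with
  | nil => simp [costB]
  | cons f fs ih =>
      have h1 := h f (by simp)
      have h2 := ih (fun g hg => h g (by simp [hg]))
      simp only [costB, List.map_cons, List.sum_cons] at h2 ⊢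
      omega

-- the binary search lands on the largest T with cost(T) ≤ k
theorem bsearchGo_spec (fs : List Int) (k : Int) (fuel : Nat) :
    ∀ lo hi : Int, (hi - lo).toNat ≤ fuel → costB fs lo ≤ k → k < costB fs hi → lo < hi →
    costB fs (bsearchGo fs k fuel lo hi) ≤ k ∧
      k < costB fs (bsearchGo fs k fuel lo hi + 1) := by
  induction fuel with
  | zero => intro lo hi hf _ _ h3; omega
  | succ fuel ih =>
      intro lo hi hf h1 h2 h3
      rw [bsearchGo]
      by_cases h : 1 < hi - lo
      · rw [if_pos h]
        have hb := PySem.Int.floordiv_two_mid_bounds (le_of_lt h3)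
        have he : PySem.Int.floordiv (lo + hi) 2 = (lo + hi) / 2 :=
          PySem.Int.floordiv_eq_ediv_of_pos (by omega)
        by_cases hc : costB fs (PySem.Int.floordiv (lo + hi) 2) ≤ k
        · rw [if_pos hc]
          exact ih _ hi (by omega) hc h2 (by omega)
        · rw [if_neg hc]
          exact ih lo _ (by omega) h1 (by omega) (by omega)
      · rw [if_neg h]
        have : hi = lo + 1 := by omega
        exact ⟨h1, this ▸ h2⟩

theorem bsearch_spec (fs : List Int) (k lo hi : Int)
    (h1 : costB fs lo ≤ k) (h2 : k < costB fs hi) (h3 : lo < hi) :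
    costB fs (bsearch fs k lo hi) ≤ k ∧ k < costB fs (bsearch fs k lo hi + 1) :=
  bsearchGo_spec fs k (hi - lo).toNat lo hi le_rfl h1 h2 h3

-- sum bounds used for the loop-condition analysis
theorem sum_min_lb (T b : Int) (l : List (Int × Int)) (h : ∀ p ∈ l, b ≤ min p.1 T) :
    b * l.length ≤ (l.map (fun p => min p.1 T)).sum := by
  induction l with
  | nil => simp
  | cons p rest ih =>
      have h1 := h p (by simp)
      have h2 := ih (fun q hq => h q (by simp [hq]))
      simp only [List.map_cons, List.sum_cons, List.length_cons]
      push_cast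
      have : b * ((rest.length : Int) + 1) = b * rest.length + b := by ring
      omega

theorem sum_min_all_gt (T : Int) (l : List (Int × Int)) (h : ∀ p ∈ l, T < p.1) :
    (l.map (fun p => min p.1 T)).sum = T * l.length := by
  induction l with
  | nil => simp
  | cons p rest ih =>
      have h1 := h p (by simp)
      have h2 := ih (fun q hq => h q (by simp [hq]))
      simp only [List.map_cons, List.sum_cons, List.length_cons] at h2 ⊢
      push_cast
      have h3 : min p.1 T = T := by omega
      have : T * ((rest.length : Int) + 1) = T * rest.length + T := by ring
      omega

-- the heap loop pops exactly the foods with time ≤ T and keeps k congruent to kB mod N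
theorem eatLoop_spec (T kB : Int) (hkB : 0 ≤ kB) (q : List (Int × Int)) (prev k' : Int)
    (hs : q.Pairwise (fun a b => a.1 ≤ b.1))
    (hN : kB < ((q.filter (fun p => decide (T < p.1))).length : Int))
    (hk : k' = kB + (q.map (fun p => min p.1 T)).sum - prev * q.length) :
    ∃ prev',
      eatLoop q k' prev q.length =
        (q.filter (fun p => decide (T < p.1)),
         kB + (T - prev') * ((q.filter (fun p => decide (T < p.1))).length : Int),
         ((q.filter (fun p => decide (T < p.1))).length : Int)) := by
  induction q generalizing prev k' with
  | nil => simp at hN; omega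
  | cons p rest ih =>
      obtain ⟨t, c⟩ := p
      have hrest : ∀ x ∈ rest, t ≤ x.1 := fun x hx => (List.pairwise_cons.mp hs).1 x hx
      by_cases hT : t ≤ T
      · -- this food is popped: the step is affordable
        have hmin : min t T = t := by omega
        have hlb : t * ((t, c) :: rest).length ≤
            (((t, c) :: rest).map (fun p => min p.1 T)).sum := by
          apply sum_min_lb
          intro x hx
          rcases List.mem_cons.mp hx with h | h
          · subst h; simp; omega
          · have := hrest x h; simp; omega
        have hcond : 0 ≤ k' - (t - prev) * (((t, c) :: rest).length : Int) := by
          have : k' - (t - prev) * (((t, c) :: rest).length : Int) =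
              kB + ((((t, c) :: rest).map (fun p => min p.1 T)).sum -
                t * ((t, c) :: rest).length) := by
            rw [hk]; push_cast; ring
          rw [this]
          push_cast at hlb ⊢
          omega
        have hfilt : ((t, c) :: rest).filter (fun p => decide (T < p.1)) =
            rest.filter (fun p => decide (T < p.1)) := by
          simp [show ¬ T < t by omega]
        have hk2 : k' - (t - prev) * (((t, c) :: rest).length : Int) =
            kB + (rest.map (fun p => min p.1 T)).sum - t * rest.length := by
          rw [hk]
          simp only [List.map_cons, List.sum_cons, List.length_cons, hmin]
          push_cast; ring
        obtain ⟨prev', hres⟩ := ih t _ (List.pairwise_cons.mp hs).2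
          (by rw [hfilt] at hN; exact hN) hk2
        refine ⟨prev', ?_⟩
        rw [eatLoop, if_pos hcond, hfilt,
          show ((((t, c) :: rest).length : Int)) - 1 = (rest.length : Int) by
            push_cast [List.length_cons]; ring]
        exact hres
      · -- T < t: every remaining food survives; the step is unaffordable
        have hall : ∀ x ∈ (t, c) :: rest, T < x.1 := by
          intro x hx
          rcases List.mem_cons.mp hx with h | h
          · subst h; simpa using (by omega : T < t)
          · have := hrest x h; omega
        have hfilt : ((t, c) :: rest).filter (fun p => decide (T < p.1)) = (t, c) :: rest :=
          List.filter_eq_self.mpr (fun x hx => by simpa using hall x hx)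
        have hsum := sum_min_all_gt T ((t, c) :: rest) hall
        have hcond : ¬ (0 ≤ k' - (t - prev) * (((t, c) :: rest).length : Int)) := by
          rw [hk, hsum]
          rw [hfilt] at hN
          have : (T - prev) * (((t, c) :: rest).length : Int) -
              (t - prev) * (((t, c) :: rest).length : Int) =
              (T - t) * (((t, c) :: rest).length : Int) := by ring
          have hlen : (1 : Int) ≤ (((t, c) :: rest).length : Int) := by
            push_cast; omega
          nlinarith [hlen, hN, hkB]
        refine ⟨prev, ?_⟩
        rw [eatLoop, if_neg hcond, hfilt]
        refine Prod.ext rfl (Prod.ext ?_ rfl)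
        rw [hk, hsum]
        push_cast
        ring

-- heapPush is an insertion: permutation + keeps the times nondecreasing
theorem heapPush_perm (x : Int × Int) (l : List (Int × Int)) :
    (heapPush x l).Perm (x :: l) := by
  induction l with
  | nil => exact List.Perm.refl _
  | cons y ys ih =>
      rw [heapPush]
      by_cases h : x.1 < y.1 ∨ (x.1 = y.1 ∧ x.2 < y.2)
      · rw [if_pos h]
      · rw [if_neg h]
        exact (ih.cons y).trans (List.Perm.swap x y ys)

theorem heapPush_pairwise (x : Int × Int) (l : List (Int × Int))
    (h : l.Pairwise (fun a b => a.1 ≤ b.1)) :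
    (heapPush x l).Pairwise (fun a b => a.1 ≤ b.1) := by
  induction l with
  | nil => simp [heapPush]
  | cons y ys ih =>
      rw [heapPush]
      rcases List.pairwise_cons.mp h with ⟨hy, hys⟩
      by_cases hc : x.1 < y.1 ∨ (x.1 = y.1 ∧ x.2 < y.2)
      · rw [if_pos hc]
        refine List.pairwise_cons.mpr ⟨?_, h⟩
        intro z hz
        rcases List.mem_cons.mp hz with hz | hz
        · subst hz; omega
        · have := hy z hz; omega
      · rw [if_neg hc]
        refine List.pairwise_cons.mpr ⟨?_, ih hys⟩
        intro z hz
        have hz' := (heapPush_perm x ys).mem_iff.mp hz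
        rcases List.mem_cons.mp hz' with hz' | hz'
        · subst hz'; omega
        · exact hy z hz'

-- the heap build: a permutation of the (time, index+1) pairs, nondecreasing in time
theorem build_spec (l : List (Int × Int)) (acc : List (Int × Int))
    (hacc : acc.Pairwise (fun a b => a.1 ≤ b.1)) :
    (l.foldl (fun acc p => heapPush (p.2, p.1 + 1) acc) acc).Perm
      (l.map (fun p => (p.2, p.1 + 1)) ++ acc) ∧
    (l.foldl (fun acc p => heapPush (p.2, p.1 + 1) acc) acc).Pairwise
      (fun a b => a.1 ≤ b.1) := by
  induction l generalizing acc with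
  | nil => exact ⟨by simp, hacc⟩
  | cons p rest ih =>
      obtain ⟨hp, hq⟩ := ih (heapPush (p.2, p.1 + 1) acc) (heapPush_pairwise _ _ hacc)
      refine ⟨?_, hq⟩
      simp only [List.foldl_cons, List.map_cons, List.cons_append]
      exact hp.trans ((List.Perm.append_left _ (heapPush_perm _ _)).trans List.perm_middle)

-- the final index-order scan of B returns the r-th survivor's index + 1
theorem pick_spec (T : Int) (l : List (Int × Int)) (r : Int) (h0 : 0 ≤ r)
    (hr : r < ((l.filter (fun p => decide (T < p.2))).length : Int)) :
    pick T l r = ((l.filter (fun p => decide (T < p.2))).getD r.toNat (0, 0)).1 + 1 := by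
  induction l generalizing r with
  | nil => simp at hr; omega
  | cons p rest ih =>
      obtain ⟨i, f⟩ := p
      by_cases hf : T < f
      · rw [pick, if_pos hf]
        by_cases hz : r = 0
        · subst hz
          simp [hf, List.getD]
        · rw [if_neg hz]
          have h1 : (0:Int) ≤ r - 1 := by omega
          have hfil : ((i, f) :: rest).filter (fun p => decide (T < p.2)) =
              (i, f) :: rest.filter (fun p => decide (T < p.2)) := by
            simp [hf]
          have hr' : r - 1 < ((rest.filter (fun p => decide (T < p.2))).length : Int) := by
            rw [hfil] at hr; push_cast [List.length_cons] at hr ⊢; omega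
          rw [ih (r - 1) h1 hr', hfil]
          have ht : r.toNat = (r - 1).toNat + 1 := by omega
          rw [ht]
          simp [List.getD]
      · rw [pick, if_neg hf]
        have hfil : ((i, f) :: rest).filter (fun p => decide (T < p.2)) =
            rest.filter (fun p => decide (T < p.2)) := by
          simp [hf]
        rw [hfil] at hr
        rw [ih r h0 hr, hfil]

-- ===== VERDICT (by name: the statement is the Claim_ definition above) =====
theorem solution_spec : Claim_equal_solution := by
  intro fs k _ hpre
  unfold Spec_solution
  by_cases hsum : fs.sum ≤ k
  · simp [solution, solution_alt, hsum]
  · have hne : fs ≠ [] := by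
      intro h; subst h; simp at hsum; have := hpre rfl; omega
    simp only [solution, solution_alt, if_neg hsum]
    obtain ⟨mv, hmv⟩ : ∃ mv, PySem.List.min? fs (fun x => x) = some mv := by
      cases h : PySem.List.min? fs (fun x => x) with
      | none => exact absurd ((PySem.List.min?_eq_none_iff fs _).mp h) hne
      | some m => exact ⟨m, rfl⟩
    obtain ⟨Mv, hMv⟩ : ∃ Mv, PySem.List.max? fs (fun x => x) = some Mv := by
      cases h : PySem.List.max? fs (fun x => x) with
      | none => exact absurd ((PySem.List.max?_eq_none_iff fs _).mp h) hne
      | some m => exact ⟨m, rfl⟩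
    have hmv_le : ∀ f ∈ fs, mv ≤ f := PySem.List.min?_isMin hmv
    have hMv_ge : ∀ f ∈ fs, f ≤ Mv := PySem.List.max?_isMax hMv
    rw [hmv, hMv]
    simp only [Option.getD_some]
    have hnpos : 0 < (fs.length : Int) := by
      have : 0 < fs.length := List.length_pos_iff.mpr hne
      omega
    set n : Int := (fs.length : Int) with hn
    set lo0 := min mv (PySem.Int.floordiv k n) with hlo0
    have hfd := PySem.Int.floordiv_mul_add_mod k n
    have hmodnn : 0 ≤ PySem.Int.mod k n := by
      rw [PySem.Int.mod_eq_emod_of_pos hnpos]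
      exact Int.emod_nonneg k (by omega)
    have hclo : costB fs lo0 ≤ k := by
      rw [costB_of_le fs lo0 (fun f hf => le_trans (min_le_left _ _) (hmv_le f hf))]
      have h1 : lo0 * n ≤ PySem.Int.floordiv k n * n :=
        mul_le_mul_of_nonneg_right (min_le_right _ _) (by omega)
      rw [← hn]
      omega
    have hchi : k < costB fs Mv := by
      rw [costB_of_ge fs Mv hMv_ge]; omega
    have hlh : lo0 < Mv := by
      by_contra h
      have := costB_mono fs (show Mv ≤ lo0 by omega)
      omega
    obtain ⟨hT1, hT2⟩ := bsearch_spec fs k lo0 Mv hclo hchi hlh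
    set T := bsearch fs k lo0 Mv with hT
    set kB := k - costB fs T with hkB
    have hkB0 : 0 ≤ kB := by omega
    have hkBlt : kB < ((fs.filter (fun f => decide (T < f))).length : Int) := by
      have := costB_succ fs T; omega
    -- the heap q: a time-sorted permutation of the (time, index+1) pairs
    obtain ⟨hqperm, hqsort⟩ := build_spec (PySem.List.enumerate fs) [] (by simp)
    set q := (PySem.List.enumerate fs).foldl (fun acc p => heapPush (p.2, p.1 + 1) acc) []
      with hq
    rw [List.append_nil] at hqperm
    have hqlen : (q.length : Int) = n := by
      rw [hqperm.length_eq, List.length_map, PySem.List.length_enumerate]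
    have hsnd : ((PySem.List.enumerate fs).map (fun p => p.2)) = fs :=
      PySem.List.map_snd_enumerate fs 0
    have hsumq : (q.map (fun p => min p.1 T)).sum = costB fs T := by
      rw [(hqperm.map (fun p => min p.1 T)).sum_eq, List.map_map, costB]
      conv_rhs => rw [← hsnd, List.map_map]
      rfl
    have hfilmap : ((PySem.List.enumerate fs).map (fun p => (p.2, p.1 + 1))).filter
        (fun p => decide (T < p.1)) =
        ((PySem.List.enumerate fs).filter (fun p => decide (T < p.2))).map
          (fun p => (p.2, p.1 + 1)) := by
      rw [List.filter_map]
      rfl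
    have hfsfil : fs.filter (fun f => decide (T < f)) =
        ((PySem.List.enumerate fs).filter (fun p => decide (T < p.2))).map
          (fun p => p.2) := by
      conv_lhs => rw [← hsnd, List.filter_map]
      rfl
    have hfl : ((q.filter (fun p => decide (T < p.1))).length : Int) =
        ((fs.filter (fun f => decide (T < f))).length : Int) := by
      rw [(hqperm.filter (fun p => decide (T < p.1))).length_eq, hfilmap,
        List.length_map, hfsfil, List.length_map]
    obtain ⟨prev', hloop⟩ := eatLoop_spec T kB hkB0 q 0 k hqsort
      (by rw [hfl]; exact hkBlt) (by rw [hsumq, hkB]; ring)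
    rw [hqlen] at hloop
    rw [hloop]
    set S := q.filter (fun p => decide (T < p.1)) with hS
    set enumF := (PySem.List.enumerate fs).filter (fun p => decide (T < p.2)) with henumF
    have heFlen : ((enumF.length : Int)) =
        ((fs.filter (fun f => decide (T < f))).length : Int) := by
      rw [henumF, hfsfil, List.length_map]
    have hLpos : 0 < ((S.length : Int)) := by rw [hS, hfl]; omega
    have hmod : PySem.Int.mod (kB + (T - prev') * (S.length : Int)) (S.length : Int) = kB := by
      rw [PySem.Int.mod_eq_emod_of_pos hLpos, Int.add_mul_emod_self_right,
        Int.emod_eq_of_lt hkB0 (by rw [hS, hfl]; exact hkBlt)]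
    have hqs : PySem.List.sorted S (fun x => x.2) =
        enumF.map (fun p => (p.2, p.1 + 1)) := by
      apply PySem.List.sorted_eq_of_perm_of_pairwise_lt
      · rw [henumF, ← hfilmap, hS]
        exact (hqperm.filter _).symm
      · rw [henumF]
        refine List.pairwise_map.mpr ?_
        refine List.Pairwise.imp ?_ ((PySem.List.pairwise_lt_enumerate fs 0).filter _)
        intro a b h
        simpa using h
    rw [hmod, hqs]
    have hkBlen : kB.toNat < enumF.length := by omega
    rw [PySem.List.pyGet?_eq_some_getElem _ hkB0
        (by rw [List.length_map]; omega),
      Option.getD_some, List.getElem_map]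
    rw [pick_spec T (PySem.List.enumerate fs) kB hkB0 (by rw [← henumF]; omega),
      ← henumF, List.getD_eq_getElem enumF (0, 0) hkBlen]
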